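-- pv_equiv track=rewrite | github.com/CS-433/ml-project-2-big-three | utils.py | remove_parentheses
-- ===== SOURCE A (Python) =====
-- def remove_parentheses(s):
--     """
--     :type s: str
--     :rtype: str
--     """
--     result = ""
--     i = 0
--     while i < len(s):
--         if s[i] == "(":
--             j = i
--             while j < len(s) and s[j] != ")":
--                 if s[j] == "(":
--                     result += s[i:j]
--                     i = j
--                 j += 1
--             if j < len(s) and s[j] == ")":
--                 result += s[i + 1:j]
--                 i = j + 1
--             else:
--                 result += s[i]
--                 i += 1
--         else:
--             result += s[i]
--             i += 1
--     return result
-- ===== SOURCE B (Python) =====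
-- def remove_parentheses(s):
--     out = []
--     buf = None
--     for c in s:
--         if c == '(':
--             if buf is not None:
--                 out.extend(buf)
--             buf = ['(']
--         elif c == ')':
--             if buf is not None:
--                 out.extend(buf[1:])
--                 buf = None
--             else:
--                 out.append(c)
--         else:
--             if buf is not None:
--                 buf.append(c)
--             else:
--                 out.append(c)
--     if buf is not None:
--         out.extend(buf)
--     return ''.join(out)
-- ===== Notes on version B (the rewrite author's own statement) =====
-- stated objective: simpler
-- what changed: Replaced A's nested rescanning while-loops with index and slice arithmetic by a single flat pass over the characters that maintains an output list plus one pending open-parenthesis buffer, flushed when the next parenthesis arrives or verbatim at the end.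
import Mathlib
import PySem

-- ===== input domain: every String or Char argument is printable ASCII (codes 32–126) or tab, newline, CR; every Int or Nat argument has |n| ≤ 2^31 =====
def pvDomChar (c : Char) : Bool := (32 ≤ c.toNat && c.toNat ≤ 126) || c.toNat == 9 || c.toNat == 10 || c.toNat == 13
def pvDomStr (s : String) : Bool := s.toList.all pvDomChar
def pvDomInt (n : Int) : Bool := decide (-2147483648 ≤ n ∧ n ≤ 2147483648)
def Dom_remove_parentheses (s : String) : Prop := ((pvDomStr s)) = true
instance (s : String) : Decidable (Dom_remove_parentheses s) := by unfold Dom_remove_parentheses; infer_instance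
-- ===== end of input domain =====

-- B replaces A's nested rescanning while-loops and slice arithmetic by one flat pass with a
-- pending-buffer accumulator (objective: simpler).

-- ===== PORT A =====
-- inner `while j < len(s) and s[j] != ")"` loop of A over state (result, i, j);
-- the fuel argument only makes the loop structurally total: with fuel ≥ len - j it never runs out
def innerAF (fuel : Nat) (cs : List Char) (res : List Char) (i j : Nat) : List Char × Nat × Nat :=
  match fuel with
  | 0 => (res, i, j)
  | fuel + 1 =>
    if j < cs.length then
      if cs.getD j ' ' = ')' then (res, i, j)
      else if cs.getD j ' ' = '(' then
        innerAF fuel cs (res ++ (cs.drop i).take (j - i)) j (j + 1)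
      else innerAF fuel cs res i (j + 1)
    else (res, i, j)

def innerA (cs : List Char) (res : List Char) (i j : Nat) : List Char × Nat × Nat :=
  innerAF (cs.length - j) cs res i j

-- outer `while i < len(s)` loop of A over state (result, i); fuel as above (≥ len - i suffices)
def outerAF (fuel : Nat) (cs : List Char) (res : List Char) (i : Nat) : List Char :=
  match fuel with
  | 0 => res
  | fuel + 1 =>
    if i < cs.length then
      if cs.getD i ' ' = '(' then
        let t := innerA cs res i i
        if t.2.2 < cs.length ∧ cs.getD t.2.2 ' ' = ')' then
          outerAF fuel cs (t.1 ++ (cs.drop (t.2.1 + 1)).take (t.2.2 - (t.2.1 + 1))) (t.2.2 + 1)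
        else
          outerAF fuel cs (t.1 ++ [cs.getD t.2.1 ' ']) (t.2.1 + 1)
      else outerAF fuel cs (res ++ [cs.getD i ' ']) (i + 1)
    else res

def outerA (cs : List Char) (res : List Char) (i : Nat) : List Char :=
  outerAF (cs.length - i) cs res i

def remove_parentheses (s : String) : String := String.mk (outerA s.toList [] 0)

-- ===== PORT B =====
-- one step of B's flat loop: state = (output so far, pending buffer or none)
def stepB (st : List Char × Option (List Char)) (c : Char) : List Char × Option (List Char) :=
  if c = '(' then
    match st.2 with
    | some b => (st.1 ++ b, some ['('])
    | none => (st.1, some ['('])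
  else if c = ')' then
    match st.2 with
    | some b => (st.1 ++ b.drop 1, none)
    | none => (st.1 ++ [c], none)
  else
    match st.2 with
    | some b => (st.1, some (b ++ [c]))
    | none => (st.1 ++ [c], none)

def remove_parentheses_alt (s : String) : String :=
  let st := s.toList.foldl stepB ([], none)
  String.mk (st.1 ++ st.2.getD [])

-- ===== PRECONDITION & SPEC =====
def Spec_remove_parentheses (s : String) (out : String) : Prop := out = remove_parentheses_alt s
instance (s : String) (out : String) : Decidable (Spec_remove_parentheses s out) := by unfold Spec_remove_parentheses; infer_instance

-- ===== CLAIM (what is proved, stated in full; the proofs are below) =====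
def Claim_equal_remove_parentheses : Prop := ∀ (s : String), Dom_remove_parentheses s → Spec_remove_parentheses s (remove_parentheses s)

-- ===== LEMMAS AND PROOFS =====

-- B's finishing step: flush the pending buffer
def finB (st : List Char × Option (List Char)) : List Char := st.1 ++ st.2.getD []

-- one-step unfolding of the inner loop, fuel hidden
theorem innerA_eq (cs res : List Char) (i j : Nat) :
    innerA cs res i j =
      (if j < cs.length then
        if cs.getD j ' ' = ')' then (res, i, j)
        else if cs.getD j ' ' = '(' then
          innerA cs (res ++ (cs.drop i).take (j - i)) j (j + 1)
        else innerA cs res i (j + 1)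
      else (res, i, j)) := by
  unfold innerA
  by_cases hj : j < cs.length
  · have hs : cs.length - j = (cs.length - (j + 1)) + 1 := by omega
    rw [hs]
    simp only [innerAF, if_pos hj]
  · have hs : cs.length - j = 0 := by omega
    rw [hs]
    simp [innerAF, hj]

-- invariants of the inner loop, needed below
theorem innerAF_bounds (cs : List Char) :
    ∀ fuel res i j, i ≤ j →
      i ≤ (innerAF fuel cs res i j).2.1 ∧ j ≤ (innerAF fuel cs res i j).2.2 := by
  intro fuel
  induction fuel with
  | zero => intro res i j hij; exact ⟨le_refl i, le_refl j⟩
  | succ fuel ih =>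
      intro res i j hij
      by_cases hj : j < cs.length
      · by_cases e1 : cs.getD j ' ' = ')'
        · simp only [innerAF, if_pos hj, if_pos e1]
          exact ⟨le_refl i, le_refl j⟩
        · by_cases e2 : cs.getD j ' ' = '('
          · simp only [innerAF, if_pos hj, if_neg e1, if_pos e2]
            have := ih (res ++ (cs.drop i).take (j - i)) j (j + 1) (by omega); omega
          · simp only [innerAF, if_pos hj, if_neg e1, if_neg e2]
            have := ih res i (j + 1) (by omega); omega
      · simp only [innerAF, if_neg hj]
        exact ⟨le_refl i, le_refl j⟩

theorem innerA_bounds (cs res : List Char) (i j : Nat) :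
    i ≤ j → i ≤ (innerA cs res i j).2.1 ∧ j ≤ (innerA cs res i j).2.2 :=
  innerAF_bounds cs (cs.length - j) res i j

-- if the inner loop stops before the end, it stops on ')'
theorem innerAF_stop (cs : List Char) :
    ∀ fuel res i j, cs.length - j ≤ fuel →
      (innerAF fuel cs res i j).2.2 < cs.length →
      cs.getD (innerAF fuel cs res i j).2.2 ' ' = ')' := by
  intro fuel
  induction fuel with
  | zero =>
      intro res i j hf
      intro h
      exact absurd (show j < cs.length from h) (by omega)
  | succ fuel ih =>
      intro res i j hf
      by_cases hj : j < cs.length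
      · by_cases e1 : cs.getD j ' ' = ')'
        · simp only [innerAF, if_pos hj, if_pos e1]
          intro _; exact e1
        · by_cases e2 : cs.getD j ' ' = '('
          · simp only [innerAF, if_pos hj, if_neg e1, if_pos e2]
            exact ih _ j (j + 1) (by omega)
          · simp only [innerAF, if_pos hj, if_neg e1, if_neg e2]
            exact ih res i (j + 1) (by omega)
      · simp only [innerAF, if_neg hj]
        intro h
        exact absurd (show j < cs.length from h) hj

theorem innerA_stop (cs res : List Char) (i j : Nat) :
    (innerA cs res i j).2.2 < cs.length → cs.getD (innerA cs res i j).2.2 ' ' = ')' :=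
  innerAF_stop cs (cs.length - j) res i j (le_refl _)

-- with enough fuel, the fuel argument of the outer loop is irrelevant
theorem outerAF_fuel (cs : List Char) :
    ∀ f1 f2 res i, cs.length - i ≤ f1 → cs.length - i ≤ f2 →
      outerAF f1 cs res i = outerAF f2 cs res i := by
  intro f1
  induction f1 with
  | zero =>
      intro f2 res i h1 h2
      have hi : ¬ i < cs.length := by omega
      cases f2 with
      | zero => rfl
      | succ f2 => simp [outerAF, hi]
  | succ f1 ih =>
      intro f2 res i h1 h2
      by_cases hi : i < cs.length
      · cases f2 with
        | zero => omega
        | succ f2 =>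
            simp only [outerAF, if_pos hi]
            by_cases e1 : cs.getD i ' ' = '('
            · simp only [if_pos e1]
              have hb := innerA_bounds cs res i i (le_refl i)
              by_cases e2 : (innerA cs res i i).2.2 < cs.length ∧
                  cs.getD (innerA cs res i i).2.2 ' ' = ')'
              · simp only [if_pos e2]
                exact ih f2 _ _ (by omega) (by omega)
              · simp only [if_neg e2]
                exact ih f2 _ _ (by omega) (by omega)
            · simp only [if_neg e1]
              exact ih f2 _ (i + 1) (by omega) (by omega)
      · cases f2 with
        | zero => simp [outerAF, hi]
        | succ f2 => simp [outerAF, hi]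

-- one-step unfolding of the outer loop, fuel hidden
theorem outerA_eq (cs res : List Char) (i : Nat) :
    outerA cs res i =
      (if i < cs.length then
        if cs.getD i ' ' = '(' then
          let t := innerA cs res i i
          if t.2.2 < cs.length ∧ cs.getD t.2.2 ' ' = ')' then
            outerA cs (t.1 ++ (cs.drop (t.2.1 + 1)).take (t.2.2 - (t.2.1 + 1))) (t.2.2 + 1)
          else
            outerA cs (t.1 ++ [cs.getD t.2.1 ' ']) (t.2.1 + 1)
        else outerA cs (res ++ [cs.getD i ' ']) (i + 1)
      else res) := by
  unfold outerA
  by_cases hi : i < cs.length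
  · have hs : cs.length - i = (cs.length - (i + 1)) + 1 := by omega
    rw [hs]
    simp only [outerAF, if_pos hi]
    by_cases e1 : cs.getD i ' ' = '('
    · simp only [if_pos e1]
      have hb := innerA_bounds cs res i i (le_refl i)
      by_cases e2 : (innerA cs res i i).2.2 < cs.length ∧
          cs.getD (innerA cs res i i).2.2 ' ' = ')'
      · simp only [if_pos e2]
        exact outerAF_fuel cs _ _ _ _ (by omega) (by omega)
      · simp only [if_neg e2]
        exact outerAF_fuel cs _ _ _ _ (by omega) (by omega)
    · simp only [if_neg e1]
  · have hs : cs.length - i = 0 := by omega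
    rw [hs]
    simp [outerAF, hi]

-- B's step on a non-'(' character with no pending buffer just copies it
theorem stepB_none (out : List Char) (c : Char) (h : c ≠ '(') :
    stepB (out, none) c = (out ++ [c], none) := by
  by_cases h2 : c = ')' <;> simp [stepB, h, h2]

-- A's outer loop on a '('-free suffix just copies it
theorem outerA_flat (cs : List Char) :
    ∀ n i res, cs.length - i ≤ n → (∀ k, i ≤ k → k < cs.length → cs.getD k ' ' ≠ '(') →
      outerA cs res i = res ++ cs.drop i := by
  intro n
  induction n with
  | zero =>
      intro i res hn _
      rw [outerA_eq]
      have hni : ¬ i < cs.length := by omega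
      simp [hni, List.drop_eq_nil_of_le (by omega : cs.length ≤ i)]
  | succ n ih =>
      intro i res hn hnp
      by_cases hi : i < cs.length
      · rw [outerA_eq]
        have hne : cs.getD i ' ' ≠ '(' := hnp i (le_refl i) hi
        simp only [if_pos hi, if_neg hne]
        rw [ih (i + 1) _ (by omega) (fun k hk hk2 => hnp k (by omega) hk2)]
        rw [List.drop_eq_getElem_cons hi, List.getD_eq_getElem cs ' ' hi]
        simp
      · rw [outerA_eq]
        simp [hi, List.drop_eq_nil_of_le (by omega : cs.length ≤ i)]

-- the buffer slice cs[i:j] grown by cs[j]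
theorem take_slice_succ (cs : List Char) (i j : Nat) (hij : i ≤ j) (hj : j < cs.length) :
    (cs.drop i).take (j - i) ++ [cs[j]] = (cs.drop i).take (j + 1 - i) := by
  have h1 : j + 1 - i = (j - i) + 1 := by omega
  rw [h1, List.take_succ]
  have h2 : (cs.drop i)[j - i]? = cs[j]? := by
    rw [List.getElem?_drop]
    congr 1; omega
  rw [h2, List.getElem?_eq_getElem hj]
  rfl

-- the tail of the buffer slice cs[i:j] is cs[i+1:j]
theorem drop_one_slice (cs : List Char) (i j : Nat) :
    ((cs.drop i).take (j - i)).drop 1 = (cs.drop (i + 1)).take (j - (i + 1)) := by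
  rw [List.drop_take, List.drop_drop]
  have e2 : j - i - 1 = j - (i + 1) := by omega
  rw [e2]

-- bridge for the inner loop: B's fold with buffer cs[i:j] tracks A's inner scan
theorem inner_sim (cs : List Char) :
    ∀ n j i res, cs.length - j ≤ n → i < cs.length → i ≤ j → j ≤ cs.length →
      (∀ k, i < k → k < cs.length → k < j → cs.getD k ' ' ≠ '(' ∧ cs.getD k ' ' ≠ ')') →
      finB (List.foldl stepB (res, some ((cs.drop i).take (j - i))) (cs.drop j)) =
        (let t := innerA cs res i j
         if t.2.2 < cs.length then
           finB (List.foldl stepB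
             (t.1 ++ (cs.drop (t.2.1 + 1)).take (t.2.2 - (t.2.1 + 1)), none) (cs.drop (t.2.2 + 1)))
         else outerA cs (t.1 ++ [cs.getD t.2.1 ' ']) (t.2.1 + 1)) := by
  intro n
  induction n with
  | zero =>
      intro j i res hn hi hij hjl hinv
      have hje : j = cs.length := by omega
      subst hje
      rw [innerA_eq]
      have hnj : ¬ cs.length < cs.length := by omega
      simp only [if_neg hnj]
      rw [outerA_flat cs cs.length (i + 1) _ (by omega)
        (fun k hk hk2 => (hinv k (by omega) hk2 hk2).1)]
      rw [List.drop_eq_nil_of_le (le_refl cs.length), List.foldl_nil]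
      have hfull : (cs.drop i).take (cs.length - i) = cs.drop i := by
        apply List.take_of_length_le; simp
      rw [hfull]
      unfold finB
      simp only [Option.getD_some]
      rw [List.drop_eq_getElem_cons hi, List.getD_eq_getElem cs ' ' hi]
      simp
  | succ n ih =>
      intro j i res hn hi hij hjl hinv
      by_cases hj : j < cs.length
      · rw [List.drop_eq_getElem_cons hj, List.foldl_cons]
        rw [innerA_eq]
        simp only [if_pos hj, List.getD_eq_getElem cs ' ' hj]
        by_cases h1 : cs[j] = ')'
        · -- matched close: flush buffer tail, clear
          simp only [if_pos h1]
          rw [h1]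
          have hstep : stepB (res, some ((cs.drop i).take (j - i))) ')' =
              (res ++ ((cs.drop i).take (j - i)).drop 1, none) := by
            simp [stepB]
          rw [hstep, drop_one_slice]
          simp [hj]
        · by_cases h2 : cs[j] = '('
          · -- inner '(': flush buffer, restart buffer at j
            simp only [if_neg h1, if_pos h2]
            rw [h2]
            have hstep : stepB (res, some ((cs.drop i).take (j - i))) '(' =
                (res ++ (cs.drop i).take (j - i), some ['(']) := by
              simp [stepB]
            rw [hstep]
            have hbuf : (['('] : List Char) = (cs.drop j).take (j + 1 - j) := by
              have : j + 1 - j = 1 := by omega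
              rw [this, List.take_one, List.head?_drop, List.getElem?_eq_getElem hj, h2]
              rfl
            rw [hbuf]
            exact ih (j + 1) j (res ++ (cs.drop i).take (j - i)) (by omega) hj (by omega)
              (by omega) (fun k hk hk2 hk3 => by omega)
          · -- plain char: append to buffer
            simp only [if_neg h1, if_neg h2]
            have hstep : stepB (res, some ((cs.drop i).take (j - i))) cs[j] =
                (res, some ((cs.drop i).take (j - i) ++ [cs[j]])) := by
              simp [stepB, h1, h2]
            rw [hstep, take_slice_succ cs i j hij hj]
            refine ih (j + 1) i res (by omega) hi (by omega) (by omega) ?_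
            intro k hk hk2 hk3
            by_cases hkj : k < j
            · exact hinv k hk hk2 hkj
            · have : k = j := by omega
              subst this
              rw [List.getD_eq_getElem cs ' ' hj]
              exact ⟨h2, h1⟩
      · have hje : j = cs.length := by omega
        subst hje
        rw [innerA_eq]
        have hnj : ¬ cs.length < cs.length := by omega
        simp only [if_neg hnj]
        rw [outerA_flat cs cs.length (i + 1) _ (by omega)
          (fun k hk hk2 => (hinv k (by omega) hk2 hk2).1)]
        rw [List.drop_eq_nil_of_le (le_refl cs.length), List.foldl_nil]
        have hfull : (cs.drop i).take (cs.length - i) = cs.drop i := by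
          apply List.take_of_length_le; simp
        rw [hfull]
        unfold finB
        simp only [Option.getD_some]
        rw [List.drop_eq_getElem_cons hi, List.getD_eq_getElem cs ' ' hi]
        simp

-- main bridge: B's fold with empty buffer tracks A's outer loop
theorem main_sim (cs : List Char) :
    ∀ n i res, cs.length - i ≤ n →
      finB (List.foldl stepB (res, none) (cs.drop i)) = outerA cs res i := by
  intro n
  induction n with
  | zero =>
      intro i res hn
      rw [outerA_eq]
      have hni : ¬ i < cs.length := by omega
      simp [hni, finB, List.drop_eq_nil_of_le (by omega : cs.length ≤ i)]
  | succ n ih =>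
      intro i res hn
      by_cases hi : i < cs.length
      · rw [List.drop_eq_getElem_cons hi, List.foldl_cons, outerA_eq]
        simp only [if_pos hi, List.getD_eq_getElem cs ' ' hi]
        by_cases hpar : cs[i] = '('
        · simp only [if_pos hpar]
          rw [hpar]
          have hstep : stepB (res, none) '(' = (res, some ['(']) := by simp [stepB]
          rw [hstep]
          have hbuf : (['('] : List Char) = (cs.drop i).take (i + 1 - i) := by
            have : i + 1 - i = 1 := by omega
            rw [this, List.take_one, List.head?_drop, List.getElem?_eq_getElem hi, hpar]
            rfl
          rw [hbuf]
          have hE : innerA cs res i i = innerA cs res i (i + 1) := by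
            rw [innerA_eq, List.getD_eq_getElem cs ' ' hi, hpar]
            simp [hi]
          rw [inner_sim cs cs.length (i + 1) i res (by omega) hi (by omega) (by omega)
            (fun k hk hk2 hk3 => by omega)]
          simp only [← hE]
          by_cases ht : (innerA cs res i i).2.2 < cs.length
          · have hstop := innerA_stop cs res i i ht
            simp only [if_pos ht, if_pos (And.intro ht hstop)]
            have hb := innerA_bounds cs res i i (le_refl i)
            exact ih ((innerA cs res i i).2.2 + 1) _ (by omega)
          · have hcond : ¬ ((innerA cs res i i).2.2 < cs.length ∧
                cs.getD (innerA cs res i i).2.2 ' ' = ')') := fun h => ht h.1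
            simp only [if_neg ht, if_neg hcond]
        · simp only [if_neg hpar]
          rw [stepB_none res cs[i] hpar]
          exact ih (i + 1) _ (by omega)
      · rw [outerA_eq]
        simp [hi, finB, List.drop_eq_nil_of_le (by omega : cs.length ≤ i)]

-- ===== VERDICT (by name: the statement is the Claim_ definition above) =====
theorem remove_parentheses_spec : Claim_equal_remove_parentheses := by
  intro s _
  unfold Spec_remove_parentheses remove_parentheses remove_parentheses_alt
  have := main_sim s.toList s.toList.length 0 [] (by omega)
  simp only [List.drop_zero] at this
  rw [← this]
  rfl
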